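-- pv_equiv track=rewrite | github.com/PanayiotaK/Error-Correcting-Codes | Ass.py | repetitionDecoder
-- ===== SOURCE A (Python) =====
-- def valid_inp(p):
--     if len(p)==0:
--         return False
--     for i in range(len(p)):
--         if p[i]!=0 and p[i]!=1:
--             return False
--
--     else:
--         return True
--
-- def repetitionDecoder(v):
--     if valid_inp(v) and len(v)>0:
--         count1=0
--         count0=0
--         L=[]
--         for i in v:
--             if i ==1:
--                 count1+=1
--             else:
--                 count0+=1
--         if count0>count1:
--             L.append(0)
--         elif count1>count0:
--             L.append(1)
--         return L
--     return []
-- ===== SOURCE B (Python) =====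
-- def repetitionDecoder(v):
--     count1 = 0
--     count0 = 0
--     for i in v:
--         if i != 0 and i != 1:
--             return []
--         if i == 1:
--             count1 += 1
--         else:
--             count0 += 1
--     if count0 > count1:
--         return [0]
--     if count1 > count0:
--         return [1]
--     return []
-- ===== Notes on version B (the rewrite author's own statement) =====
-- stated objective: simpler
-- what changed: Fuses A's separate validity scan and counting scan into one single-pass loop with early exit on an invalid symbol; ties and the degenerate cases fall through to the same result without a special branch.
import Mathlib
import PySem

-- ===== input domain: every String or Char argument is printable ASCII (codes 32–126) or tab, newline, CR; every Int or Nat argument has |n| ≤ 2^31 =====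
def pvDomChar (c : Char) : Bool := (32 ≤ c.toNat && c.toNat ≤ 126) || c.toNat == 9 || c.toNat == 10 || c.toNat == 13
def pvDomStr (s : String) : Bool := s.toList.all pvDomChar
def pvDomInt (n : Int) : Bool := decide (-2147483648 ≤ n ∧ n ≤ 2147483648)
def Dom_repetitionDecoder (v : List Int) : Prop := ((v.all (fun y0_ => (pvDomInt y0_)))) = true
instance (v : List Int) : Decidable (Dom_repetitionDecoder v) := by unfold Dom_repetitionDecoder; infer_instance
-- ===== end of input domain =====

-- B fuses A's validity scan and counting scan into one single-pass loop with early exit (objective: simpler).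

-- ===== PORT A =====
-- A's valid_inp: empty list is invalid; loop returns False on the first non-{0,1} element, else True.
def pvValidLoop : List Int → Bool
  | [] => true
  | x :: xs => if x ≠ 0 ∧ x ≠ 1 then false else pvValidLoop xs

def pvValidInp (p : List Int) : Bool :=
  if p.length = 0 then false else pvValidLoop p

def repetitionDecoder (v : List Int) : List Int :=
  if pvValidInp v = true ∧ v.length > 0 then
    let c := v.foldl (fun (c : Int × Int) i => if i = 1 then (c.1 + 1, c.2) else (c.1, c.2 + 1)) (0, 0)
    if c.2 > c.1 then [0]
    else if c.1 > c.2 then [1]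
    else []
  else []

-- ===== PORT B =====
-- single pass: early return [] on an invalid symbol, otherwise count; compare at the end.
def pvAltLoop : List Int → Int → Int → List Int
  | [], count1, count0 =>
      if count0 > count1 then [0]
      else if count1 > count0 then [1]
      else []
  | i :: rest, count1, count0 =>
      if i ≠ 0 ∧ i ≠ 1 then []
      else if i = 1 then pvAltLoop rest (count1 + 1) count0
      else pvAltLoop rest count1 (count0 + 1)

def repetitionDecoder_alt (v : List Int) : List Int := pvAltLoop v 0 0

-- ===== PRECONDITION & SPEC =====
def Spec_repetitionDecoder (v : List Int) (out : List Int) : Prop := out = repetitionDecoder_alt v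
instance (v : List Int) (out : List Int) : Decidable (Spec_repetitionDecoder v out) := by unfold Spec_repetitionDecoder; infer_instance

-- ===== CLAIM (what is proved, stated in full; the proofs are below) =====
def Claim_equal_repetitionDecoder : Prop := ∀ (v : List Int), Dom_repetitionDecoder v → Spec_repetitionDecoder v (repetitionDecoder v)

-- ===== LEMMAS AND PROOFS =====

-- B's loop, from arbitrary counters, equals: if all symbols valid then compare the folded counts else [].
theorem pvAltLoop_eq (xs : List Int) : ∀ (c1 c0 : Int),
    pvAltLoop xs c1 c0 =
      if pvValidLoop xs = true then
        (let c := xs.foldl (fun (c : Int × Int) i => if i = 1 then (c.1 + 1, c.2) else (c.1, c.2 + 1)) (c1, c0)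
         if c.2 > c.1 then [0] else if c.1 > c.2 then [1] else [])
      else [] := by
  induction xs with
  | nil => intro c1 c0; simp [pvAltLoop, pvValidLoop]
  | cons x xs ih =>
      intro c1 c0
      by_cases hx : x ≠ 0 ∧ x ≠ 1
      · simp [pvAltLoop, pvValidLoop, hx]
      · by_cases h1 : x = 1
        · simp [pvAltLoop, pvValidLoop, hx, h1, List.foldl_cons, ih]
        · have hx0 : x = 0 := by tauto
          simp [pvAltLoop, pvValidLoop, hx0, List.foldl_cons, ih]

theorem ports_agree (v : List Int) : repetitionDecoder v = repetitionDecoder_alt v := by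
  cases v with
  | nil => rfl
  | cons x xs =>
      unfold repetitionDecoder repetitionDecoder_alt
      rw [pvAltLoop_eq]
      by_cases hv : pvValidLoop (x :: xs) = true
      · have : pvValidInp (x :: xs) = true := by simp [pvValidInp, hv]
        simp [this, hv]
      · have : ¬ (pvValidInp (x :: xs) = true) := by simp [pvValidInp]; simpa using hv
        simp [this, hv]

-- ===== VERDICT (by name: the statement is the Claim_ definition above) =====
theorem repetitionDecoder_spec : Claim_equal_repetitionDecoder := by
  intro v _
  unfold Spec_repetitionDecoder
  exact ports_agree v
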